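-- pv_equiv track=rewrite | github.com/thomasxm/CrowdSentinels-AI-MCP | src/wireshark/reporting/timeline_visualizer.py | generate_lateral_movement_graph
-- ===== SOURCE A (Python) =====
-- from typing import Dict, List, Optional, Any
--
-- def generate_lateral_movement_graph(
--
--     movements: List[Dict]
-- ) -> str:
--     """Generate lateral movement graph.
--
--     Args:
--         movements: List of lateral movement dictionaries
--
--     Returns:
--         ASCII representation of lateral movement
--     """
--     if not movements:
--         return "No lateral movement detected."
--
--     lines = []
--     lines.append(" LATERAL MOVEMENT MAP")
--     lines.append("═" * 60)
--     lines.append("")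
--
--     # Group by source
--     by_source = {}
--     for mov in movements:
--         src = mov.get("src_ip", "unknown")
--         by_source.setdefault(src, []).append(mov)
--
--     for src_ip, movs in by_source.items():
--         lines.append(f" [{src_ip}]")
--
--         for mov in movs:
--             dst = mov.get("dst_ip", "?")
--             mov_type = mov.get("movement_type", "unknown")
--             lines.append(f"      │")
--             lines.append(f"      └──({mov_type})──> [{dst}]")
--
--         lines.append("")
--
--     lines.append("═" * 60)
--
--     return "\n".join(lines)
-- ===== SOURCE B (Python) =====
-- def generate_lateral_movement_graph(movements):
--     """Generate lateral movement graph (distinct sources, then one formatted block per source)."""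
--     if not movements:
--         return "No lateral movement detected."
--
--     bar = "═" * 60
--
--     def block(src):
--         body = "".join(
--             "      │\n      └──(%s)──> [%s]\n"
--             % (m.get("movement_type", "unknown"), m.get("dst_ip", "?"))
--             for m in movements
--             if m.get("src_ip", "unknown") == src
--         )
--         return " [%s]\n%s\n" % (src, body)
--
--     sources = dict.fromkeys(m.get("src_ip", "unknown") for m in movements)
--     return " LATERAL MOVEMENT MAP\n%s\n\n%s%s" % (bar, "".join(map(block, sources)), bar)
-- ===== Notes on version B (the rewrite author's own statement) =====
-- stated objective: alternative
-- what changed: Replaces A's incremental dict-of-lists grouping and flat line-list join with a distinct-source pass (dict.fromkeys) followed by one filtering scan per source that formats each source's whole block as a single string, concatenated into the final format string.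
import Mathlib
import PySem

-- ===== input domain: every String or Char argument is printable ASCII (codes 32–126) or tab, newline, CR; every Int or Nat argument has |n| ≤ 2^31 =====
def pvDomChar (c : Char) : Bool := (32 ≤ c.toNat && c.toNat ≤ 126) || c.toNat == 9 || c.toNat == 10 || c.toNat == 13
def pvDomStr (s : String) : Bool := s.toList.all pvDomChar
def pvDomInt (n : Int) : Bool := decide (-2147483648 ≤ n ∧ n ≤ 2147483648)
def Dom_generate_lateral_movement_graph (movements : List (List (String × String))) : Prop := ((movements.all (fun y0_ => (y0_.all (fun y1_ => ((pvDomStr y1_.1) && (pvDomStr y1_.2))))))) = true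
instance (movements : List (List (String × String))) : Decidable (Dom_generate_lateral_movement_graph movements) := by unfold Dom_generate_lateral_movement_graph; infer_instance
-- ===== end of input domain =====

-- B replaces A's incremental dict-of-lists grouping plus flat line-list join with a distinct-source pass followed by one filtering scan per source, each block formatted as a single string (alternative decomposition, same result).


-- ===== PORT A =====
-- "═" * 60
def pvBar : String := String.mk (List.replicate 60 '═')

-- mov.get("src_ip", "unknown")
def pvSrc (mov : List (String × String)) : String :=
  (PySem.Dict.mk mov).getD "src_ip" "unknown"

-- the two lines appended for one movement
def pvMovLines (mov : List (String × String)) : List String :=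
  ["      │",
   "      └──(" ++ (PySem.Dict.mk mov).getD "movement_type" "unknown" ++ ")──> ["
     ++ (PySem.Dict.mk mov).getD "dst_ip" "?" ++ "]"]

def generate_lateral_movement_graph (movements : List (List (String × String))) : String :=
  if movements = [] then "No lateral movement detected."
  else
    let lines : List String := [" LATERAL MOVEMENT MAP", pvBar, ""]
    -- by_source.setdefault(src, []).append(mov) == by_source[src] = by_source.get(src, []) + [mov]
    let by_source : PySem.Dict String (List (List (String × String))) :=
      movements.foldl (fun d mov => d.modify (pvSrc mov) [] (· ++ [mov])) PySem.Dict.empty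
    let lines := by_source.items.foldl (fun lines p =>
      let lines := lines ++ [" [" ++ p.1 ++ "]"]
      let lines := p.2.foldl (fun ls mov => ls ++ pvMovLines mov) lines
      lines ++ [""]) lines
    PySem.Str.join "\n" (lines ++ [pvBar])

-- ===== PORT B =====
-- "═" * 60
def pvAltBar : String := String.mk (List.replicate 60 '═')

-- m.get("src_ip", "unknown")
def pvAltSrc (m : List (String × String)) : String :=
  (PySem.Dict.mk m).getD "src_ip" "unknown"

-- "      │\n      └──(%s)──> [%s]\n" % (…, …)
def pvMovStr (m : List (String × String)) : String :=
  "      │" ++ "\n" ++ "      └──(" ++ (PySem.Dict.mk m).getD "movement_type" "unknown"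
    ++ ")──> [" ++ (PySem.Dict.mk m).getD "dst_ip" "?" ++ "]" ++ "\n"

-- block(src): " [%s]\n%s\n" % (src, body)
def pvBlock (movements : List (List (String × String))) (src : String) : String :=
  " [" ++ src ++ "]" ++ "\n"
    ++ PySem.Str.join "" ((movements.filter (fun m => pvAltSrc m == src)).map pvMovStr)
    ++ "\n"

def generate_lateral_movement_graph_alt (movements : List (List (String × String))) : String :=
  if movements = [] then "No lateral movement detected."
  else
    -- sources = dict.fromkeys(...)
    let sources : List String := PySem.List.dedup (movements.map pvAltSrc)
    -- " LATERAL MOVEMENT MAP\n%s\n\n%s%s" % (bar, "".join(map(block, sources)), bar)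
    " LATERAL MOVEMENT MAP" ++ "\n" ++ pvAltBar ++ "\n" ++ "\n"
      ++ PySem.Str.join "" (sources.map (pvBlock movements))
      ++ pvAltBar

-- ===== PRECONDITION & SPEC =====
def Spec_generate_lateral_movement_graph (movements : List (List (String × String))) (out : String) : Prop := out = generate_lateral_movement_graph_alt movements
instance (movements : List (List (String × String))) (out : String) : Decidable (Spec_generate_lateral_movement_graph movements out) := by unfold Spec_generate_lateral_movement_graph; infer_instance

-- ===== CLAIM (what is proved, stated in full; the proofs are below) =====
def Claim_equal_generate_lateral_movement_graph : Prop := ∀ (movements : List (List (String × String))), Dom_generate_lateral_movement_graph movements → Spec_generate_lateral_movement_graph movements (generate_lateral_movement_graph movements)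

-- ===== LEMMAS AND PROOFS =====

theorem pvAltSrc_eq : pvAltSrc = pvSrc := rfl

theorem pvAltBar_eq : pvAltBar = pvBar := rfl

-- A's grouping dict, characterised: its items are the first-seen sources paired with the filtered groups.
theorem pv_items_by_source (movements : List (List (String × String))) :
    (movements.foldl (fun d mov => d.modify (pvSrc mov) [] (· ++ [mov]))
        (PySem.Dict.empty : PySem.Dict String (List (List (String × String))))).items
      = (PySem.List.dedup (movements.map pvSrc)).map
          (fun s => (s, movements.filter (fun m => pvSrc m == s))) := by
  set d := movements.foldl (fun d mov => d.modify (pvSrc mov) [] (· ++ [mov]))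
      (PySem.Dict.empty : PySem.Dict String (List (List (String × String)))) with hd
  have hkeys : d.keys = PySem.List.dedup (movements.map pvSrc) := by
    rw [hd, PySem.Dict.keys_foldl_modify_key]
    simp [PySem.Set.update_nil_left, PySem.Dict.keys_empty]
  have hnd : d.keys.Nodup := by
    rw [hkeys]; exact PySem.List.nodup_dedup _
  have hgetD : ∀ s, d.getD s [] = movements.filter (fun m => pvSrc m == s) := by
    intro s
    have hmap : d = (movements.map (fun m => (pvSrc m, m))).foldl
        (fun d p => d.modify p.1 [] (· ++ [p.2])) PySem.Dict.empty := by
      rw [hd, List.foldl_map]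
    rw [hmap, PySem.Dict.getD_foldl_modify_append]
    simp [PySem.Dict.getD_empty, List.filter_map, Function.comp_def]
  rw [PySem.Dict.items_eq_map_keys d hnd [], hkeys]
  exact List.map_congr_left (fun s _ => by rw [hgetD s])

-- the three lines A appends for source s (header, movement lines, trailing blank)
def pvBlockLines (movements : List (List (String × String))) (s : String) : List String :=
  (" [" ++ s ++ "]") :: ((movements.filter (fun m => pvSrc m == s)).flatMap pvMovLines ++ [""])

-- A's outer foldl flattened into a flatMap of per-source line blocks
theorem pv_foldA (movements : List (List (String × String))) :
    ∀ (L : List String) (init : List String),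
      L.foldl (fun lines s =>
        (movements.filter (fun m => pvSrc m == s)).foldl
            (fun ls mov => ls ++ pvMovLines mov) (lines ++ [" [" ++ s ++ "]"]) ++ [""]) init
        = init ++ L.flatMap (pvBlockLines movements) := by
  intro L
  induction L with
  | nil => intro init; simp
  | cons s ss ih =>
      intro init
      simp only [List.foldl_cons, PySem.List.foldl_append_eq_flatMap, pvBlockLines,
        List.flatMap_cons, List.append_assoc, List.cons_append, List.nil_append]
      rfl

-- "\n".join with a last element, over chars
theorem pv_chars_join_snoc (sep : List Char) (xs : List (List Char)) (y : List Char) :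
    PySem.Chars.join sep (xs ++ [y]) = (xs.map (· ++ sep)).flatten ++ y := by
  induction xs with
  | nil => simp [PySem.Chars.join_singleton]
  | cons x xs ih =>
      cases xs with
      | nil => simp [PySem.Chars.join_cons_cons, PySem.Chars.join_singleton]
      | cons x' xs' =>
          rw [List.cons_append, List.cons_append, PySem.Chars.join_cons_cons,
            ← List.cons_append, ih]
          simp

-- "".join over chars is flatten
theorem pv_chars_join_nil (l : List (List Char)) : PySem.Chars.join [] l = l.flatten := by
  induction l with
  | nil => simp [PySem.Chars.join_nil]
  | cons x xs ih =>
      cases xs with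
      | nil => simp [PySem.Chars.join_singleton]
      | cons y ys => rw [PySem.Chars.join_cons_cons] at *; simp [ih]

-- one movement's two A-lines, each newline-terminated, are B's movement string
theorem pv_mov_chars (movs : List (List (String × String))) :
    (((movs.flatMap pvMovLines).map String.toList).map (· ++ ['\n'])).flatten
      = ((movs.map pvMovStr).map String.toList).flatten := by
  induction movs with
  | nil => simp
  | cons m ms ih =>
      simp only [List.flatMap_cons, List.map_cons, List.map_append, List.flatten_append,
        List.flatten_cons, ih, pvMovLines, pvMovStr, String.toList_append]
      simp

-- one source's A-lines, newline-terminated, are B's block string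
theorem pv_block_chars (movements : List (List (String × String))) (s : String) :
    (((pvBlockLines movements s).map String.toList).map (· ++ ['\n'])).flatten
      = (pvBlock movements s).toList := by
  simp only [pvBlockLines, pvBlock, pvAltSrc_eq, List.map_cons, List.map_append,
    List.flatten_cons, List.flatten_append, String.toList_append, PySem.Str.toList_join]
  have h0 : ("" : String).toList = [] := rfl
  have h1 : ("\n" : String).toList = ['\n'] := rfl
  rw [h0, h1, pv_chars_join_nil, List.map_map]
  have := pv_mov_chars (movements.filter (fun m => pvSrc m == s))
  simp only [List.map_map] at this ⊢
  simp [this]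

theorem pv_core (movements : List (List (String × String))) (sources : List String) :
    (((sources.flatMap (pvBlockLines movements)).map String.toList).map (· ++ ['\n'])).flatten
      = ((sources.map (pvBlock movements)).map String.toList).flatten := by
  induction sources with
  | nil => simp
  | cons s ss ih =>
      simp only [List.flatMap_cons, List.map_cons, List.map_append, List.flatten_append,
        List.flatten_cons, ih, pv_block_chars]

-- ===== VERDICT (by name: the statement is the Claim_ definition above) =====
theorem generate_lateral_movement_graph_spec : Claim_equal_generate_lateral_movement_graph := by
  intro movements _
  show generate_lateral_movement_graph movements = generate_lateral_movement_graph_alt movements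
  unfold generate_lateral_movement_graph generate_lateral_movement_graph_alt
  split
  · rfl
  · simp only [pv_items_by_source, List.foldl_map]
    rw [pv_foldA]
    apply String.toList_inj.mp
    simp only [PySem.Str.toList_join, String.toList_append, pvAltSrc_eq, pvAltBar_eq]
    have h1 : ("\n" : String).toList = ['\n'] := rfl
    have h0 : ("" : String).toList = [] := rfl
    rw [h0, h1, pv_chars_join_nil]
    rw [show ((([" LATERAL MOVEMENT MAP", pvBar, ""] ++
        (PySem.List.dedup (movements.map pvSrc)).flatMap (pvBlockLines movements)) ++ [pvBar]).map
          String.toList) = ((([" LATERAL MOVEMENT MAP", pvBar, ""] ++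
        (PySem.List.dedup (movements.map pvSrc)).flatMap (pvBlockLines movements)).map
          String.toList) ++ [pvBar.toList]) by simp]
    rw [pv_chars_join_snoc]
    simp only [List.map_append, List.map_cons, List.map_nil, List.flatten_append,
      List.flatten_cons, List.flatten_nil, List.map_map]
    have := pv_core movements (PySem.List.dedup (movements.map pvSrc))
    simp only [PySem.List.dedup_eq_ofList, List.map_map] at this ⊢
    simp [this, h0]
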